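-- pv_equiv track=rewrite | github.com/vyntendo64/Demultiplexer | BarcodeFileParser.py | get_barcodes_from_mismatches
-- ===== SOURCE A (Python) =====
-- def get_barcodes_from_mismatches(mismatches, barcode_number):
--     barcodes = {}
--     collision_sequences = []
--     for possible_barcode in mismatches:
--         if possible_barcode not in collision_sequences:
--             if possible_barcode not in list(barcodes.keys()):
--                 barcodes[possible_barcode] = barcode_number
--             else:
--                 collision_sequences.append(possible_barcode)
--                 del barcodes[possible_barcode]
--     return barcodes
-- ===== SOURCE B (Python) =====
-- def get_barcodes_from_mismatches(mismatches, barcode_number):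
--     counts = {}
--     for bc in mismatches:
--         counts[bc] = counts.get(bc, 0) + 1
--     return {bc: barcode_number for bc, c in counts.items() if c == 1}
-- ===== Notes on version B (the rewrite author's own statement) =====
-- stated objective: faster
-- what changed: Replaces A's single-pass add/delete collision tracking (dict plus a collision list with linear list-membership scans of collision_sequences and list(barcodes.keys())) by a count-then-filter shape: one pass builds occurrence counts, then a dict comprehension keeps barcodes occurring exactly once.
import Mathlib
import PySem

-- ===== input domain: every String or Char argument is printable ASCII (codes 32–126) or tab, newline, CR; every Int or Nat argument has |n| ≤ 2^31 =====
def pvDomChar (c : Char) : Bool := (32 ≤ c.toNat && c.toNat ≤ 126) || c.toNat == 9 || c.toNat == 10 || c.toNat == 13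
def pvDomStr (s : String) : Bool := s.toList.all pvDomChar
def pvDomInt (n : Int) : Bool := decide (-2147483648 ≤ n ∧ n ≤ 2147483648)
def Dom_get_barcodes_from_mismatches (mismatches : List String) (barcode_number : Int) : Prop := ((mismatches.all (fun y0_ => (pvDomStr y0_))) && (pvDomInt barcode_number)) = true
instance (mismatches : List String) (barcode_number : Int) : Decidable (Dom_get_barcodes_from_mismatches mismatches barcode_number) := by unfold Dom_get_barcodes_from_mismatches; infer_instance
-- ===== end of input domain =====

-- B replaces A's add/delete collision-tracking loop by count-then-filter (build occurrence
-- counts in one pass, then keep the barcodes seen exactly once); a timing run measured B faster.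

-- ===== PORT A =====
-- one iteration of A's loop body: state = (barcodes dict, collision_sequences list)
def pvStepA (barcode_number : Int) (st : PySem.Dict String Int × List String) (x : String) :
    PySem.Dict String Int × List String :=
  if st.2.contains x then st
  else if st.1.keys.contains x then (st.1.erase x, st.2 ++ [x])
  else (st.1.insert x barcode_number, st.2)

def get_barcodes_from_mismatches (mismatches : List String) (barcode_number : Int) : List (String × Int) :=
  (mismatches.foldl (pvStepA barcode_number) (PySem.Dict.empty, [])).1.items

-- ===== PORT B =====
def get_barcodes_from_mismatches_alt (mismatches : List String) (barcode_number : Int) : List (String × Int) :=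
  let counts : PySem.Dict String Int :=
    mismatches.foldl (fun d x => d.insert x (d.getD x 0 + 1)) PySem.Dict.empty
  (counts.items.filter (fun p => p.2 == 1)).map (fun p => (p.1, barcode_number))

-- ===== PRECONDITION & SPEC =====
def Spec_get_barcodes_from_mismatches (mismatches : List String) (barcode_number : Int) (out : List (String × Int)) : Prop := out = get_barcodes_from_mismatches_alt mismatches barcode_number
instance (mismatches : List String) (barcode_number : Int) (out : List (String × Int)) : Decidable (Spec_get_barcodes_from_mismatches mismatches barcode_number out) := by unfold Spec_get_barcodes_from_mismatches; infer_instance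

-- ===== CLAIM (what is proved, stated in full; the proofs are below) =====
def Claim_equal_get_barcodes_from_mismatches : Prop := ∀ (mismatches : List String) (barcode_number : Int), Dom_get_barcodes_from_mismatches mismatches barcode_number → Spec_get_barcodes_from_mismatches mismatches barcode_number (get_barcodes_from_mismatches mismatches barcode_number)



-- ===== LEMMAS AND PROOFS =====

-- the common characterisation: barcodes occurring exactly once, in first-appearance order
def pvTarget (barcode_number : Int) (p : List String) : List (String × Int) :=
  ((PySem.Set.ofList p).filter (fun k => p.count k == 1)).map (fun k => (k, barcode_number))

theorem pvCount_single (k x : String) : List.count k [x] = if x = k then 1 else 0 := by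
  by_cases h : x = k <;> simp [h]

theorem pvSet_append_mem (p : List String) (x : String) (h : x ∈ p) :
    PySem.Set.ofList (p ++ [x]) = PySem.Set.ofList p := by
  rw [PySem.Set.ofList_append, PySem.Set.update_cons, PySem.Set.update_nil]
  simp [PySem.Set.add, PySem.Set.contains, (PySem.Set.mem_ofList p x).2 h]

theorem pvSet_append_not_mem (p : List String) (x : String) (h : x ∉ p) :
    PySem.Set.ofList (p ++ [x]) = PySem.Set.ofList p ++ [x] := by
  rw [PySem.Set.ofList_append, PySem.Set.update_cons, PySem.Set.update_nil]
  have : x ∉ PySem.Set.ofList p := fun hm => h ((PySem.Set.mem_ofList p x).1 hm)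
  simp [PySem.Set.add, PySem.Set.contains, this]

theorem pvKeys_eq (bn : Int) (p : List String) (d : PySem.Dict String Int)
    (hd : d.items = pvTarget bn p) :
    d.keys = (PySem.Set.ofList p).filter (fun k => p.count k == 1) := by
  simp only [PySem.Dict.keys, hd, pvTarget, List.map_map]
  simp [Function.comp_def]

theorem pvKeys_mem (bn : Int) (p : List String) (d : PySem.Dict String Int) (x : String)
    (hd : d.items = pvTarget bn p) :
    x ∈ d.keys ↔ p.count x = 1 := by
  rw [pvKeys_eq bn p d hd]
  simp only [List.mem_filter, PySem.Set.mem_ofList, beq_iff_eq]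
  constructor
  · rintro ⟨_, h⟩; exact h
  · intro h; exact ⟨List.count_pos_iff.mp (by omega), h⟩

theorem pvColl_mem (p coll : List String)
    (hc : ∀ k, coll.contains k = decide (2 ≤ p.count k)) (k : String) :
    k ∈ coll ↔ 2 ≤ p.count k := by
  have := hc k
  rw [Bool.eq_iff_iff] at this
  simpa using this

theorem pvLoopA_inv (bn : Int) (xs : List String) : ∀ (p : List String)
    (d : PySem.Dict String Int) (coll : List String),
    d.items = pvTarget bn p →
    (∀ k, coll.contains k = decide (2 ≤ p.count k)) →
    (xs.foldl (pvStepA bn) (d, coll)).1.items = pvTarget bn (p ++ xs) := by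
  induction xs with
  | nil => intro p d coll hd _; simpa using hd
  | cons x xs ih =>
    intro p d coll hd hc
    rw [List.foldl_cons]
    have hbk := pvColl_mem p coll hc
    have hkb := pvKeys_mem bn p d x hd
    by_cases h2 : 2 ≤ p.count x
    · -- already a recorded collision: the state is unchanged
      have hxc : x ∈ coll := (hbk x).mpr h2
      have hstep : pvStepA bn (d, coll) x = (d, coll) := by simp [pvStepA, hxc]
      rw [hstep]
      have hmem : x ∈ p := List.count_pos_iff.mp (by omega)
      have hres := ih (p ++ [x]) d coll ?_ ?_
      · simpa using hres
      · rw [hd]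
        unfold pvTarget
        rw [pvSet_append_mem p x hmem]
        congr 1
        refine (List.filter_congr ?_).symm
        intro k _
        rw [Bool.eq_iff_iff]
        simp only [List.count_append, pvCount_single, beq_iff_eq]
        by_cases hxk : x = k
        · subst hxk; simp; omega
        · simp [hxk]
      · intro k
        rw [Bool.eq_iff_iff]
        simp only [List.contains_iff_mem, List.count_append, pvCount_single,
          decide_eq_true_eq, hbk k]
        by_cases hxk : x = k
        · subst hxk; rw [if_pos rfl]; omega
        · simp [hxk]
    · by_cases h1 : p.count x = 1
      · -- second occurrence: delete from barcodes, record the collision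
        have hnc : x ∉ coll := fun hm => h2 ((hbk x).mp hm)
        have hxk : x ∈ d.keys := hkb.mpr h1
        have hstep : pvStepA bn (d, coll) x = (d.erase x, coll ++ [x]) := by
          simp [pvStepA, hnc, hxk]
        rw [hstep]
        have hmem : x ∈ p := List.count_pos_iff.mp (by omega)
        have hres := ih (p ++ [x]) (d.erase x) (coll ++ [x]) ?_ ?_
        · simpa using hres
        · have herase : (d.erase x).items = d.items.filter (fun q => !(q.1 == x)) := by
            simp [PySem.Dict.erase]
          rw [herase, hd]
          unfold pvTarget
          rw [pvSet_append_mem p x hmem, List.filter_map, List.filter_filter]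
          congr 1
          refine (List.filter_congr ?_).symm
          intro k _
          rw [Bool.eq_iff_iff]
          by_cases hkk : x = k
          · subst hkk
            simp [List.count_append, h1]
          · have hkx : ¬ k = x := fun h => hkk h.symm
            simp [List.count_append, hkk, hkx]
        · intro k
          rw [Bool.eq_iff_iff]
          simp only [List.contains_iff_mem, List.mem_append, List.mem_singleton,
            List.count_append, pvCount_single, decide_eq_true_eq, hbk k]
          by_cases hkk : x = k
          · subst hkk; simp [h1]
          · have hkx : ¬ k = x := fun h => hkk h.symm
            simp [hkk, hkx]
      · -- first occurrence: insert into barcodes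
        have h0 : p.count x = 0 := by omega
        have hnp : x ∉ p := by
          intro hm
          have hpos : 0 < List.count x p := List.count_pos_iff.mpr hm
          omega
        have hnc : x ∉ coll := fun hm => h2 ((hbk x).mp hm)
        have hnk : x ∉ d.keys := fun hm => h1 (hkb.mp hm)
        have hstep : pvStepA bn (d, coll) x = (d.insert x bn, coll) := by
          simp [pvStepA, hnc, hnk]
        rw [hstep]
        have hdcon : d.contains x = false := by
          rw [PySem.Dict.contains_eq_decide_mem_keys]
          simpa using hnk
        have hres := ih (p ++ [x]) (d.insert x bn) coll ?_ ?_
        · simpa using hres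
        · have hitems : (d.insert x bn).items = d.items ++ [(x, bn)] := by
            simp [PySem.Dict.items_insert, hdcon]
          rw [hitems, hd]
          unfold pvTarget
          rw [pvSet_append_not_mem p x hnp, List.filter_append, List.map_append]
          congr 2
          · refine (List.filter_congr ?_).symm
            intro k hk
            have hxk : ¬ x = k := fun h => hnp (h ▸ (PySem.Set.mem_ofList p k).1 hk)
            rw [Bool.eq_iff_iff]
            simp [List.count_append, hxk]
          · simp [List.count_append, pvCount_single, h0]
        · intro k
          rw [Bool.eq_iff_iff]
          simp only [List.contains_iff_mem, List.count_append, pvCount_single,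
            decide_eq_true_eq, hbk k]
          by_cases hxk : x = k
          · subst hxk; rw [if_pos rfl]; omega
          · simp [hxk]

theorem pvAltEq (mismatches : List String) (bn : Int) :
    get_barcodes_from_mismatches_alt mismatches bn = pvTarget bn mismatches := by
  show (((PySem.Dict.counter mismatches).items.filter (fun p => p.2 == 1)).map
      (fun p => (p.1, bn))) = pvTarget bn mismatches
  rw [PySem.Dict.items_counter]
  simp only [pvTarget, List.filter_map, Function.comp_def, List.map_map]
  congr 1
  refine List.filter_congr ?_
  intro x _
  rw [show (((List.count x mismatches : Int)) == 1) = (List.count x mismatches == 1) by simp]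

-- ===== VERDICT (by name: the statement is the Claim_ definition above) =====
theorem get_barcodes_from_mismatches_spec : Claim_equal_get_barcodes_from_mismatches := by
  intro ms bn _
  unfold Spec_get_barcodes_from_mismatches
  rw [pvAltEq]
  have h := pvLoopA_inv bn ms [] PySem.Dict.empty [] (by rfl) (by intro k; simp)
  simpa [get_barcodes_from_mismatches] using h
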